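-- pv_equiv track=rewrite | github.com/ramsai-5A1/Super_100_Batch_Codes | 10_aggressive_cows.py | solve
-- ===== SOURCE A (Python) =====
-- def solve(n,k,stalls):
--     stalls.sort()
--     maxPossible = stalls[n - 1] - stalls[0]
--     minPossible = stalls[1] - stalls[0]
--     for index in range(2, n):
--         minPossible = min(minPossible, stalls[index] - stalls[index - 1])
--
--     def isPossible(val):
--         cowsToBePlaced = k - 1
--         previousCow = 0
--
--         for index in range(1, n):
--             diff = stalls[index] - stalls[previousCow]
--             if diff >= val:
--                 previousCow = index
--                 cowsToBePlaced -= 1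
--                 if cowsToBePlaced == 0:
--                     return True
--         return False
--
--     result = -1
--     left, right = minPossible, maxPossible
--     while left <= right:
--         mid = (left + right) // 2
--         if isPossible(mid):
--             result = mid
--             left = mid + 1
--         else:
--             right = mid - 1
--     return result
-- ===== SOURCE B (Python) =====
-- def solve(n, k, stalls):
--     stalls.sort()
--
--     def isPossible(val):
--         cowsToBePlaced = k - 1
--         previousCow = 0
--         for index in range(1, n):
--             diff = stalls[index] - stalls[previousCow]
--             if diff >= val:
--                 previousCow = index
--                 cowsToBePlaced -= 1
--                 if cowsToBePlaced == 0:
--                     return True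
--         return False
--
--     # Candidate answers are exactly the pairwise gaps of the sorted stalls:
--     # the optimum is the smallest spacing of some placement, hence itself a gap.
--     # Feasibility is monotone, so walk the distinct gaps upwards and keep the
--     # last feasible one, stopping at the first infeasible candidate.
--     gaps = sorted({stalls[j] - stalls[i] for j in range(n) for i in range(j)})
--     best = -1
--     for g in gaps:
--         if not isPossible(g):
--             break
--         best = g
--     return best
-- ===== Notes on version B (the rewrite author's own statement) =====
-- stated objective: alternative
-- what changed: Binary search over the value interval [minPossible, maxPossible] is replaced by enumerating the distinct pairwise gaps of the sorted stalls as the candidate set, sorting them, and scanning them upwards with the same greedy feasibility check until the first infeasible one; this is correct because the optimum, when it exists, is itself a pairwise gap and feasibility is monotone.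
import Mathlib
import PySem

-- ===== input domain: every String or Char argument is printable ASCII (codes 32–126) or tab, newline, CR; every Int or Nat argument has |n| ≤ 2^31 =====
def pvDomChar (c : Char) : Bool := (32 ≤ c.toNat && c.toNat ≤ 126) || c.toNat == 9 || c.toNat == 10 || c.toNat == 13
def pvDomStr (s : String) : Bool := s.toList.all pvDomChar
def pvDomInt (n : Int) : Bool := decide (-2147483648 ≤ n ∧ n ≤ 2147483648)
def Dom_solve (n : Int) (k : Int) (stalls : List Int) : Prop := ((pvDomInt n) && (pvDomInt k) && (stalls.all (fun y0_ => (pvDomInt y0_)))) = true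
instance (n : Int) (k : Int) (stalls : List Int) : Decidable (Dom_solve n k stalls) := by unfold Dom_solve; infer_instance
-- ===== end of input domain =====

-- B replaces A's binary search over the value interval by sorting the distinct pairwise
-- gaps of the sorted stalls and scanning them upwards with the same greedy feasibility
-- check; equivalence is about the RETURN value (both Pythons sort `stalls` in place).

-- ===== PORT A =====
-- stalls[i] (possibly negative index, Python wraparound); inside Pre_ every access is
-- in range, where pyGetD is exact (the default 0 is never consulted).
def pvGet (st : List Int) (i : Int) : Int := PySem.List.pyGetD st i 0

-- the inner function isPossible, shared verbatim by both Pythons: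
-- loop over `for index in range(1, n)` with early return True
def pvIsPossibleGo (st : List Int) (val : Int) : List Int → Int → Int → Bool
  | [], _, _ => false
  | index :: rest, cows, prev =>
    if pvGet st index - pvGet st prev ≥ val then
      if cows - 1 = 0 then true
      else pvIsPossibleGo st val rest (cows - 1) index
    else pvIsPossibleGo st val rest cows prev

def pvIsPossible (st : List Int) (n k val : Int) : Bool :=
  pvIsPossibleGo st val (PySem.List.pyRange 1 n 1) (k - 1) 0

-- A's `while left <= right` binary-search loop
def pvBisect (st : List Int) (n k left right result : Int) : Int :=
  if h : left ≤ right then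
    let mid := PySem.Int.floordiv (left + right) 2
    if pvIsPossible st n k mid then pvBisect st n k (mid + 1) right mid
    else pvBisect st n k left (mid - 1) result
  else result
termination_by (right + 1 - left).toNat
decreasing_by
  · have := PySem.Int.floordiv_two_mid_bounds h
    omega
  · have := PySem.Int.floordiv_two_mid_bounds h
    omega

def solve (n : Int) (k : Int) (stalls : List Int) : Int :=
  let st := PySem.List.sorted stalls (fun x => x) false
  let maxPossible := pvGet st (n - 1) - pvGet st 0
  let minPossible := (PySem.List.pyRange 2 n 1).foldl
    (fun m index => min m (pvGet st index - pvGet st (index - 1)))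
    (pvGet st 1 - pvGet st 0)
  pvBisect st n k minPossible maxPossible (-1)

-- ===== PORT B =====
-- `sorted({stalls[j] - stalls[i] for j in range(n) for i in range(j)})`
def pvGaps (st : List Int) (n : Int) : List Int :=
  PySem.List.sorted
    (PySem.Set.ofList ((PySem.List.pyRange 0 n 1).flatMap
      (fun j => (PySem.List.pyRange 0 j 1).map (fun i => pvGet st j - pvGet st i))))
    (fun x => x) false

-- `best = -1; for g in gaps: if not isPossible(g): break; best = g; return best`
def pvScan (st : List Int) (n k : Int) : List Int → Int → Int
  | [], best => best
  | g :: rest, best => if pvIsPossible st n k g then pvScan st n k rest g else best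

def solve_alt (n : Int) (k : Int) (stalls : List Int) : Int :=
  let st := PySem.List.sorted stalls (fun x => x) false
  pvScan st n k (pvGaps st n) (-1)

-- ===== PRECONDITION & SPEC =====
-- Pre_ excludes exactly the inputs where Python A raises IndexError:
-- lists shorter than 2 (stalls[1]) and n with n-1 outside Python's wraparound range.
def Pre_solve (n : Int) (k : Int) (stalls : List Int) : Prop :=
  2 ≤ stalls.length ∧ 1 - (stalls.length : Int) ≤ n ∧ n ≤ (stalls.length : Int)
instance (n : Int) (k : Int) (stalls : List Int) : Decidable (Pre_solve n k stalls) := by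
  unfold Pre_solve; infer_instance

def pvWitness_solve : Int × Int × List Int := (4, 2, [1, 5, 2, 9])

def Spec_solve (n : Int) (k : Int) (stalls : List Int) (out : Int) : Prop := out = solve_alt n k stalls
instance (n : Int) (k : Int) (stalls : List Int) (out : Int) : Decidable (Spec_solve n k stalls out) := by unfold Spec_solve; infer_instance

-- ===== CLAIM (what is proved, stated in full; the proofs are below) =====
def Claim_equal_solve : Prop := ∀ (n : Int) (k : Int) (stalls : List Int), Dom_solve n k stalls → Pre_solve n k stalls → Spec_solve n k stalls (solve n k stalls)

-- ===== LEMMAS AND PROOFS =====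

-- sorted access: index-monotone reads
lemma pvGet_mono {st : List Int} (hst : st.Pairwise (· ≤ ·)) {a b : Int}
    (ha : 0 ≤ a) (hab : a ≤ b) (hb : b < (st.length : Int)) :
    pvGet st a ≤ pvGet st b := by
  rcases eq_or_lt_of_le hab with rfl | hlt
  · exact le_refl _
  · unfold pvGet
    rw [PySem.List.pyGetD_eq_getElem st 0 ha (by omega),
        PySem.List.pyGetD_eq_getElem st 0 (by omega : (0:Int) ≤ b) hb]
    exact List.pairwise_iff_getElem.mp hst a.toNat b.toNat (by omega) (by omega) (by omega)

-- greedy placement count (proof-side view of pvIsPossibleGo without the early exit)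
def pvCount (st : List Int) (val : Int) : List Int → Int → Int
  | [], _ => 0
  | i :: rest, prev =>
    if pvGet st i - pvGet st prev ≥ val then pvCount st val rest i + 1
    else pvCount st val rest prev

lemma pvCount_nonneg (st : List Int) (val : Int) (idxs : List Int) (prev : Int) :
    0 ≤ pvCount st val idxs prev := by
  induction idxs generalizing prev with
  | nil => simp [pvCount]
  | cons i rest ih =>
    simp only [pvCount]
    split
    · have := ih i; omega
    · exact ih prev

lemma pvIsPossibleGo_iff_count (st : List Int) (val : Int) (idxs : List Int) :
    ∀ cows prev, (pvIsPossibleGo st val idxs cows prev = true ↔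
      1 ≤ cows ∧ cows ≤ pvCount st val idxs prev) := by
  induction idxs with
  | nil => intro cows prev; simp [pvIsPossibleGo, pvCount]; omega
  | cons i rest ih =>
    intro cows prev
    simp only [pvIsPossibleGo, pvCount]
    split
    · by_cases hc : cows - 1 = 0
      · rw [if_pos hc]
        have := pvCount_nonneg st val rest i
        constructor
        · intro _; omega
        · intro _; rfl
      · rw [if_neg hc]
        rw [ih (cows - 1) i]
        omega
    · exact ih cows prev

-- well-formed (strictly increasing, bounded) index streams with their previous index
def pvGood (bnd : Int) (idxs : List Int) (p : Int) : Prop :=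
  (p :: idxs).Pairwise (· < ·) ∧ 0 ≤ p ∧ ∀ i ∈ p :: idxs, i ≤ bnd

lemma pvGood_tail_same {bnd : Int} {i : Int} {rest : List Int} {p : Int}
    (h : pvGood bnd (i :: rest) p) : pvGood bnd rest p := by
  obtain ⟨hpw, hp0, hmem⟩ := h
  refine ⟨?_, hp0, ?_⟩
  · exact hpw.sublist (by
      exact List.Sublist.cons₂ p (List.sublist_cons_self i rest))
  · intro j hj
    rcases List.mem_cons.mp hj with rfl | hj
    · exact hmem _ (by simp)
    · exact hmem _ (by simp [hj])

lemma pvGood_tail_new {bnd : Int} {i : Int} {rest : List Int} {p : Int}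
    (h : pvGood bnd (i :: rest) p) : pvGood bnd rest i := by
  obtain ⟨hpw, hp0, hmem⟩ := h
  rw [List.pairwise_cons] at hpw
  refine ⟨hpw.2, ?_, ?_⟩
  · have := hpw.1 i (by simp); omega
  · intro j hj
    rcases List.mem_cons.mp hj with rfl | hj
    · exact hmem _ (by simp)
    · exact hmem _ (by simp [hj])

lemma pvGood_head_lt {bnd : Int} {i : Int} {rest : List Int} {p : Int}
    (h : pvGood bnd (i :: rest) p) : p < i := by
  obtain ⟨hpw, _, _⟩ := h
  rw [List.pairwise_cons] at hpw
  exact hpw.1 i (by simp)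

-- the greedy count is monotone in the threshold (and dominated starts cost at most one)
lemma pvCount_mono {st : List Int} (hst : st.Pairwise (· ≤ ·)) {bnd : Int}
    (hbnd : bnd < (st.length : Int)) {v v' : Int} (hv : v' ≤ v) :
    ∀ (idxs : List Int) (p p' : Int), pvGood bnd idxs p → pvGood bnd idxs p' →
      ((pvGet st p' ≤ pvGet st p → pvCount st v idxs p ≤ pvCount st v' idxs p') ∧
       pvCount st v idxs p ≤ 1 + pvCount st v' idxs p') := by
  intro idxs
  induction idxs with
  | nil =>
    intro p p' _ _
    constructor
    · intro _; simp [pvCount]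
    · simp [pvCount]
  | cons i rest ih =>
    intro p p' hp hp'
    have hpi : p < i := pvGood_head_lt hp
    have hp'i : p' < i := pvGood_head_lt hp'
    have hiB : i ≤ bnd := hp.2.2 i (by simp)
    have hiL : i < (st.length : Int) := by omega
    have h0p : 0 ≤ p := hp.2.1
    have h0p' : 0 ≤ p' := hp'.2.1
    have gpi : pvGet st p ≤ pvGet st i := pvGet_mono hst h0p (le_of_lt hpi) hiL
    have gp'i : pvGet st p' ≤ pvGet st i := pvGet_mono hst h0p' (le_of_lt hp'i) hiL
    have hGii : pvGood bnd rest i := pvGood_tail_new hp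
    have hGp : pvGood bnd rest p := pvGood_tail_same hp
    have hGp' : pvGood bnd rest p' := pvGood_tail_same hp'
    constructor
    · intro hpp'
      simp only [pvCount]
      by_cases h1 : pvGet st i - pvGet st p ≥ v
      · have h2 : pvGet st i - pvGet st p' ≥ v' := by omega
        rw [if_pos h1, if_pos h2]
        have := (ih i i hGii hGii).1 (le_refl _)
        omega
      · rw [if_neg h1]
        by_cases h2 : pvGet st i - pvGet st p' ≥ v'
        · rw [if_pos h2]
          have := (ih p i hGp hGii).2
          omega
        · rw [if_neg h2]
          exact (ih p p' hGp hGp').1 hpp'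
    · simp only [pvCount]
      by_cases h1 : pvGet st i - pvGet st p ≥ v
      · rw [if_pos h1]
        by_cases h2 : pvGet st i - pvGet st p' ≥ v'
        · rw [if_pos h2]
          have := (ih i i hGii hGii).2
          omega
        · rw [if_neg h2]
          have := (ih i p' hGii hGp').1 gp'i
          omega
      · rw [if_neg h1]
        by_cases h2 : pvGet st i - pvGet st p' ≥ v'
        · rw [if_pos h2]
          have := (ih p i hGp hGii).2
          have := pvCount_nonneg st v' rest i
          omega
        · rw [if_neg h2]
          exact (ih p p' hGp hGp').2

lemma pvGood_range {n : Int} (hn : 2 ≤ n) :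
    pvGood (n - 1) (PySem.List.pyRange 1 n 1) 0 := by
  refine ⟨?_, le_refl _, ?_⟩
  · rw [List.pairwise_cons]
    refine ⟨?_, PySem.List.pairwise_lt_pyRange_one 1 n⟩
    intro x hx
    have := (PySem.List.mem_pyRange_one).mp hx
    omega
  · intro i hi
    rcases List.mem_cons.mp hi with rfl | hi
    · omega
    · have := (PySem.List.mem_pyRange_one).mp hi
      omega

lemma pvIsPossible_mono {st : List Int} (hst : st.Pairwise (· ≤ ·)) {n k : Int}
    (hnL : n ≤ (st.length : Int)) {v v' : Int} (hv : v' ≤ v)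
    (h : pvIsPossible st n k v = true) : pvIsPossible st n k v' = true := by
  by_cases hn : n ≤ 1
  · exfalso
    unfold pvIsPossible at h
    rw [PySem.List.pyRange_one_eq_nil (by omega)] at h
    simp [pvIsPossibleGo] at h
  · unfold pvIsPossible at h ⊢
    rw [pvIsPossibleGo_iff_count] at h ⊢
    obtain ⟨h1, h2⟩ := h
    refine ⟨h1, le_trans h2 ?_⟩
    have hG := pvGood_range (n := n) (by omega)
    exact (pvCount_mono hst (bnd := n - 1) (by omega) hv
      (PySem.List.pyRange 1 n 1) 0 0 hG hG).1 (le_refl _)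

-- a positive greedy count at threshold v is also achieved at some pairwise-gap
-- threshold m ≥ v (the minimum spacing of the greedy placement, itself a gap)
lemma pvCount_gap_exists {st : List Int} (hst : st.Pairwise (· ≤ ·)) {bnd : Int}
    (hbnd : bnd < (st.length : Int)) {v : Int} :
    ∀ (idxs : List Int) (prev c : Int), pvGood bnd idxs prev →
      1 ≤ c → c ≤ pvCount st v idxs prev →
      ∃ m, v ≤ m ∧
        (∃ a b : Int, prev ≤ a ∧ a < b ∧ b ≤ bnd ∧ m = pvGet st b - pvGet st a) ∧
        c ≤ pvCount st m idxs prev := by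
  intro idxs
  induction idxs with
  | nil =>
    intro prev c _ hc1 hc2
    simp [pvCount] at hc2
    omega
  | cons i rest ih =>
    intro prev c hG hc1 hc2
    have hpi : prev < i := pvGood_head_lt hG
    have hiB : i ≤ bnd := hG.2.2 i (by simp)
    have hGi : pvGood bnd rest i := pvGood_tail_new hG
    have hGp : pvGood bnd rest prev := pvGood_tail_same hG
    simp only [pvCount] at hc2
    by_cases h1 : pvGet st i - pvGet st prev ≥ v
    · rw [if_pos h1] at hc2
      by_cases hc : c ≤ 1
      · refine ⟨pvGet st i - pvGet st prev, h1, ⟨prev, i, le_refl _, hpi, hiB, rfl⟩, ?_⟩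
        simp only [pvCount]
        rw [if_pos (le_refl _)]
        have := pvCount_nonneg st (pvGet st i - pvGet st prev) rest i
        omega
      · obtain ⟨m', hm'v, ⟨a, b, hab0, hab1, hab2, hab3⟩, hm'c⟩ :=
          ih i (c - 1) hGi (by omega) (by omega)
        by_cases hmin : pvGet st i - pvGet st prev ≤ m'
        · refine ⟨pvGet st i - pvGet st prev, h1, ⟨prev, i, le_refl _, hpi, hiB, rfl⟩, ?_⟩
          simp only [pvCount]
          rw [if_pos (le_refl _)]
          have := (pvCount_mono hst hbnd hmin rest i i hGi hGi).1 (le_refl _)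
          omega
        · refine ⟨m', hm'v, ⟨a, b, by omega, hab1, hab2, hab3⟩, ?_⟩
          simp only [pvCount]
          rw [if_pos (by omega)]
          omega
    · rw [if_neg h1] at hc2
      obtain ⟨m, hmv, ⟨a, b, hab0, hab1, hab2, hab3⟩, hmc⟩ := ih prev c hGp hc1 hc2
      refine ⟨m, hmv, ⟨a, b, hab0, hab1, hab2, hab3⟩, ?_⟩
      simp only [pvCount]
      rw [if_neg (by omega)]
      exact hmc

-- descending linear search: the reference description A's binary search is reduced to
def pvDesc (P : Int → Bool) (hi lo : Int) : Int :=
  if hi < lo then -1 else if P hi then hi else pvDesc P (hi - 1) lo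
termination_by (hi + 1 - lo).toNat
decreasing_by omega

lemma pvDesc_eq_neg_one {P : Int → Bool} {hi lo : Int} (hlo : 0 ≤ lo)
    (h : pvDesc P hi lo = -1) :
    ∀ d, lo ≤ d → d ≤ hi → P d = false := by
  revert h
  fun_induction pvDesc P hi lo with
  | case1 hi hlt => intro _ d h1 h2; omega
  | case2 hi hlt hP => intro h; omega
  | case3 hi hlt hP ih =>
    intro h d h1 h2
    rcases eq_or_lt_of_le h2 with rfl | hdl
    · simpa using hP
    · exact ih h d h1 (by omega)

lemma pvDesc_spec {P : Int → Bool} {hi lo : Int} (h : pvDesc P hi lo ≠ -1) :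
    lo ≤ pvDesc P hi lo ∧ pvDesc P hi lo ≤ hi ∧ P (pvDesc P hi lo) = true ∧
      ∀ d, pvDesc P hi lo < d → d ≤ hi → P d = false := by
  revert h
  fun_induction pvDesc P hi lo with
  | case1 hi hlt => intro h; omega
  | case2 hi hlt hP =>
    intro _
    refine ⟨by omega, le_refl _, hP, ?_⟩
    intro d h1 h2; omega
  | case3 hi hlt hP ih =>
    intro h
    obtain ⟨i1, i2, i3, i4⟩ := ih h
    refine ⟨i1, by omega, i3, ?_⟩
    intro d h1 h2
    rcases eq_or_lt_of_le h2 with rfl | hdl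
    · simpa using hP
    · exact i4 d h1 (by omega)

lemma pvDesc_widen {P : Int → Bool} {hi lo lo' : Int} (hll : lo ≤ lo')
    (h : pvDesc P hi lo' ≠ -1) : pvDesc P hi lo = pvDesc P hi lo' := by
  revert h
  fun_induction pvDesc P hi lo' with
  | case1 hi hlt => intro h; omega
  | case2 hi hlt hP =>
    intro _
    rw [pvDesc, if_neg (by omega), if_pos hP]
  | case3 hi hlt hP ih =>
    intro h
    rw [pvDesc, if_neg (by omega), if_neg hP]
    exact ih h

lemma pvDesc_exact {P : Int → Bool} {hi lo m : Int} (hm : lo ≤ m) (hmh : m ≤ hi)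
    (hP : P m = true) (habove : ∀ d, m < d → d ≤ hi → P d = false) :
    pvDesc P hi lo = m := by
  revert hmh habove
  fun_induction pvDesc P hi lo with
  | case1 hi hlt => intro hmh _; omega
  | case2 hi hlt hP' =>
    intro hmh habove
    by_contra hne
    have hfa : P hi = false := habove hi (by omega) (le_refl _)
    rw [hP'] at hfa; exact absurd hfa (by simp)
  | case3 hi hlt hP' ih =>
    intro hmh habove
    have hne : hi ≠ m := by
      intro hEq; rw [hEq, hP] at hP'; exact absurd rfl hP'
    exact ih (by omega) (fun d h1 h2 => habove d h1 (by omega))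

lemma pvDesc_drop_top {P : Int → Bool} {hi lo m : Int} (hmr : m - 1 ≤ hi)
    (hfalse : ∀ d, m ≤ d → d ≤ hi → P d = false) :
    pvDesc P hi lo = pvDesc P (m - 1) lo := by
  revert hmr hfalse
  fun_induction pvDesc P hi lo with
  | case1 hi hlt =>
    intro hmr _
    rw [pvDesc, if_pos (by omega)]
  | case2 hi hlt hP =>
    intro hmr hfalse
    have hhim : hi ≤ m - 1 := by
      by_contra hgt
      have hfa := hfalse hi (by omega) (le_refl _)
      rw [hP] at hfa; exact absurd hfa (by simp)
    have hEq : m - 1 = hi := by omega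
    rw [hEq, pvDesc, if_neg hlt, if_pos hP]
  | case3 hi hlt hP ih =>
    intro hmr hfalse
    by_cases hhim : hi = m - 1
    · rw [← hhim]
      conv_rhs => rw [pvDesc]
      rw [if_neg hlt, if_neg hP]
    · rw [ih (by omega) (fun d h1 h2 => hfalse d h1 (by omega))]

lemma pvDesc_all_false {P : Int → Bool} {hi lo : Int}
    (h : ∀ d, P d = false) : pvDesc P hi lo = -1 := by
  by_contra hne
  obtain ⟨_, _, hP, _⟩ := pvDesc_spec hne
  rw [h] at hP
  exact absurd hP (by simp)

-- A's binary search equals the descending search (feasibility monotone, range nonneg)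
lemma pvBisect_eq_desc {st : List Int} {n k : Int}
    (Hmono : ∀ v' v : Int, v' ≤ v → pvIsPossible st n k v = true → pvIsPossible st n k v' = true) :
    ∀ (l r res : Int), 0 ≤ l →
      pvBisect st n k l r res =
        (if pvDesc (fun d => pvIsPossible st n k d) r l = -1 then res
         else pvDesc (fun d => pvIsPossible st n k d) r l) := by
  intro l r res
  fun_induction pvBisect st n k l r res with
  | case1 l r res hlr mid hP ih =>
    intro hl0
    have hmb : l ≤ mid ∧ mid ≤ r := PySem.Int.floordiv_two_mid_bounds hlr
    rw [ih (by omega)]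
    by_cases hdm : pvDesc (fun d => pvIsPossible st n k d) r (mid + 1) = -1
    · have hall := pvDesc_eq_neg_one (by omega) hdm
      have hmain : pvDesc (fun d => pvIsPossible st n k d) r l = mid :=
        pvDesc_exact (by omega) (by omega) hP (fun d h1 h2 => hall d (by omega) h2)
      rw [hdm, hmain, if_pos rfl, if_neg (show ¬ (mid = -1) by omega)]
    · have hw : pvDesc (fun d => pvIsPossible st n k d) r l =
          pvDesc (fun d => pvIsPossible st n k d) r (mid + 1) :=
        pvDesc_widen (by omega) hdm
      rw [hw, if_neg hdm, if_neg hdm]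
  | case2 l r res hlr mid hPf ih =>
    intro hl0
    have hmb : l ≤ mid ∧ mid ≤ r := PySem.Int.floordiv_two_mid_bounds hlr
    rw [ih hl0]
    have hfalse : ∀ d, mid ≤ d → d ≤ r → pvIsPossible st n k d = false := by
      intro d h1 h2
      by_contra hne
      have hT : pvIsPossible st n k d = true := by simpa using hne
      exact hPf (Hmono mid d h1 hT)
    rw [pvDesc_drop_top (by omega) hfalse]
  | case3 l r res hlr =>
    intro hl0
    rw [pvDesc, if_pos (by omega)]

-- B's scan over an increasing candidate list
lemma pvScan_all_false {st : List Int} {n k : Int} {L : List Int}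
    (h : ∀ g ∈ L, pvIsPossible st n k g = false) :
    ∀ best, pvScan st n k L best = best := by
  induction L with
  | nil => intro best; rfl
  | cons g rest ih =>
    intro best
    simp only [pvScan]
    rw [h g (by simp)]
    simp only [Bool.false_eq_true, if_false]

lemma pvScan_exact {st : List Int} {n k : Int} {L : List Int} {d : Int}
    (hpw : L.Pairwise (· < ·)) (hd : d ∈ L)
    (hiff : ∀ g ∈ L, pvIsPossible st n k g = true ↔ g ≤ d) :
    ∀ best, pvScan st n k L best = d := by
  induction L with
  | nil => exact absurd hd (by simp)
  | cons g rest ih =>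
    intro best
    rw [List.pairwise_cons] at hpw
    rcases List.mem_cons.mp hd with rfl | hdr
    · simp only [pvScan]
      rw [if_pos ((hiff d (by simp)).mpr (le_refl _))]
      apply pvScan_all_false
      intro x hx
      have hgx : d < x := hpw.1 x hx
      have hx' := (hiff x (by simp [hx]))
      rcases Bool.eq_false_or_eq_true (pvIsPossible st n k x) with ht | hf
      · exact absurd (hx'.mp ht) (by omega)
      · exact hf
    · have hgd : g < d := hpw.1 d hdr
      simp only [pvScan]
      rw [if_pos ((hiff g (by simp)).mpr (by omega))]
      exact ih hpw.2 hdr (fun x hx => hiff x (by simp [hx])) g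

-- membership in B's candidate set
lemma mem_pvGaps {st : List Int} {n g : Int} :
    g ∈ pvGaps st n ↔
      ∃ a b : Int, 0 ≤ a ∧ a < b ∧ b < n ∧ g = pvGet st b - pvGet st a := by
  unfold pvGaps
  rw [PySem.List.mem_sorted, PySem.Set.mem_ofList]
  constructor
  · intro h
    rw [List.mem_flatMap] at h
    obtain ⟨j, hj, hg⟩ := h
    rw [List.mem_map] at hg
    obtain ⟨i, hi, hgi⟩ := hg
    have hj' := PySem.List.mem_pyRange_one.mp hj
    have hi' := PySem.List.mem_pyRange_one.mp hi
    exact ⟨i, j, by omega, by omega, by omega, hgi.symm⟩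
  · rintro ⟨a, b, h0, h1, h2, rfl⟩
    rw [List.mem_flatMap]
    refine ⟨b, PySem.List.mem_pyRange_one.mpr (by omega), ?_⟩
    rw [List.mem_map]
    exact ⟨a, PySem.List.mem_pyRange_one.mpr (by omega), rfl⟩

lemma pairwise_pvGaps (st : List Int) (n : Int) : (pvGaps st n).Pairwise (· < ·) :=
  PySem.List.sorted_ofList_pairwise_lt _

-- lower bound of the folded minimum against its seed and every summand
lemma pvFoldlMin_le (f : Int → Int) :
    ∀ (idxs : List Int) (init : Int),
      idxs.foldl (fun m i => min m (f i)) init ≤ init ∧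
        ∀ i ∈ idxs, idxs.foldl (fun m i => min m (f i)) init ≤ f i := by
  intro idxs
  induction idxs with
  | nil => intro init; exact ⟨le_refl _, by simp⟩
  | cons i rest ih =>
    intro init
    simp only [List.foldl_cons]
    obtain ⟨a, b⟩ := ih (min init (f i))
    refine ⟨le_trans a (min_le_left _ _), ?_⟩
    intro j hj
    rcases List.mem_cons.mp hj with rfl | hj
    · exact le_trans a (min_le_right _ _)
    · exact b j hj

-- the folded minimum of nonnegative values is nonnegative
lemma pvFoldlMin_nonneg (f : Int → Int) :
    ∀ (idxs : List Int) (init : Int), (∀ i ∈ idxs, 0 ≤ f i) → 0 ≤ init →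
      0 ≤ idxs.foldl (fun m i => min m (f i)) init := by
  intro idxs
  induction idxs with
  | nil => intro init _ h0; exact h0
  | cons i rest ih =>
    intro init hf h0
    simp only [List.foldl_cons]
    exact ih (min init (f i)) (fun j hj => hf j (by simp [hj]))
      (le_min h0 (hf i (by simp)))

-- ===== VERDICT (by name: the statement is the Claim_ definition above) =====
theorem solve_spec : Claim_equal_solve := by
  intro n k stalls hdom hpre
  obtain ⟨hL2, hnlo, hnhi⟩ := hpre
  unfold Spec_solve
  simp only [solve, solve_alt]
  set st := PySem.List.sorted stalls (fun x => x) false with hstdef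
  have hstL : st.length = stalls.length := by
    rw [hstdef]; exact PySem.List.length_sorted stalls (fun x => x) false
  have hst : st.Pairwise (· ≤ ·) := by
    have h := PySem.List.sorted_pairwise stalls (fun x => x)
    rw [← hstdef] at h
    simpa using h
  set maxP := pvGet st (n - 1) - pvGet st 0 with hmaxPdef
  set minP := (PySem.List.pyRange 2 n 1).foldl
    (fun m index => min m (pvGet st index - pvGet st (index - 1)))
    (pvGet st 1 - pvGet st 0) with hminPdef
  have hinit : 0 ≤ pvGet st 1 - pvGet st 0 := by
    have := pvGet_mono hst (a := 0) (b := 1) (by omega) (by omega) (by omega)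
    omega
  have hdiff : ∀ i ∈ PySem.List.pyRange 2 n 1, 0 ≤ pvGet st i - pvGet st (i - 1) := by
    intro i hi
    have hm := PySem.List.mem_pyRange_one.mp hi
    have := pvGet_mono hst (a := i - 1) (b := i) (by omega) (by omega) (by omega)
    omega
  have hminP0 : 0 ≤ minP := by
    rw [hminPdef]
    exact pvFoldlMin_nonneg _ _ _ hdiff hinit
  have Hmono : ∀ v' v : Int, v' ≤ v → pvIsPossible st n k v = true →
      pvIsPossible st n k v' = true :=
    fun v' v hv h => pvIsPossible_mono hst (by omega) hv h
  rw [pvBisect_eq_desc Hmono minP maxP (-1) hminP0]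
  by_cases hn2 : n ≤ 1
  · -- range(1, n) is empty: nothing is feasible, both sides return -1
    have hallf : ∀ d, pvIsPossible st n k d = false := by
      intro d
      unfold pvIsPossible
      rw [PySem.List.pyRange_one_eq_nil (by omega)]
      rfl
    rw [pvDesc_all_false hallf, if_pos rfl]
    rw [pvScan_all_false (fun g _ => hallf g)]
  · -- n ≥ 2: every candidate gap lies in [minP, maxP]
    have hgap_le_max : ∀ a b : Int, 0 ≤ a → a < b → b ≤ n - 1 →
        pvGet st b - pvGet st a ≤ maxP := by
      intro a b h0 h1 h2
      have g1 : pvGet st b ≤ pvGet st (n - 1) :=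
        pvGet_mono hst (by omega) (by omega) (by omega)
      have g2 : pvGet st 0 ≤ pvGet st a :=
        pvGet_mono hst (by omega) h0 (by omega)
      omega
    have hgap_ge_min : ∀ a b : Int, 0 ≤ a → a < b → b ≤ n - 1 →
        minP ≤ pvGet st b - pvGet st a := by
      intro a b h0 h1 h2
      have hstep : minP ≤ pvGet st (a + 1) - pvGet st a := by
        rw [hminPdef]
        by_cases ha0 : a = 0
        · subst ha0
          simpa using (pvFoldlMin_le (fun i => pvGet st i - pvGet st (i - 1))
            (PySem.List.pyRange 2 n 1) (pvGet st 1 - pvGet st 0)).1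
        · have hmem : a + 1 ∈ PySem.List.pyRange 2 n 1 :=
            PySem.List.mem_pyRange_one.mpr (by omega)
          have := (pvFoldlMin_le (fun i => pvGet st i - pvGet st (i - 1))
            (PySem.List.pyRange 2 n 1) (pvGet st 1 - pvGet st 0)).2 (a + 1) hmem
          simpa using this
      have hup : pvGet st (a + 1) ≤ pvGet st b :=
        pvGet_mono hst (by omega) (by omega) (by omega)
      omega
    by_cases hdm : pvDesc (fun d => pvIsPossible st n k d) maxP minP = -1
    · -- nothing in [minP, maxP] is feasible, so no gap is feasible: both return -1
      rw [hdm, if_pos rfl]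
      rw [pvScan_all_false]
      intro g hg
      obtain ⟨a, b, h0, h1, h2, rfl⟩ := mem_pvGaps.mp hg
      exact pvDesc_eq_neg_one hminP0 hdm _
        (hgap_ge_min a b h0 h1 (by omega)) (hgap_le_max a b h0 h1 (by omega))
    · -- d* = the maximum feasible value; it is a pairwise gap, and B's scan finds it
      rw [if_neg hdm]
      obtain ⟨hMlo, hMhi, hMP, hMab⟩ := pvDesc_spec hdm
      set d := pvDesc (fun v => pvIsPossible st n k v) maxP minP with hddef
      have hMP' : pvIsPossible st n k d = true := hMP
      unfold pvIsPossible at hMP'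
      rw [pvIsPossibleGo_iff_count] at hMP'
      obtain ⟨hk1, hkc⟩ := hMP'
      obtain ⟨m, hmd, ⟨a, b, ha0, hab, hbB, hmeq⟩, hmc⟩ :=
        pvCount_gap_exists hst (bnd := n - 1) (by omega)
          (PySem.List.pyRange 1 n 1) 0 (k - 1) (pvGood_range (by omega)) hk1 hkc
      have hmP : pvIsPossible st n k m = true := by
        unfold pvIsPossible
        rw [pvIsPossibleGo_iff_count]
        exact ⟨hk1, hmc⟩
      have hmmax : m ≤ maxP := by
        rw [hmeq]; exact hgap_le_max a b ha0 hab hbB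
      have hmd' : m = d := by
        by_contra hne
        have := hMab m (by omega) hmmax
        rw [hmP] at this
        exact absurd this (by simp)
      symm
      apply pvScan_exact (pairwise_pvGaps st n)
      · rw [mem_pvGaps]
        exact ⟨a, b, ha0, hab, by omega, by omega⟩
      · intro g hg
        obtain ⟨a', b', h0', h1', h2', rfl⟩ := mem_pvGaps.mp hg
        constructor
        · intro hPg
          by_contra hgt
          have := hMab _ (by omega) (hgap_le_max a' b' h0' h1' (by omega))
          rw [hPg] at this
          exact absurd this (by simp)
        · intro hle
          exact Hmono _ _ hle hMP
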